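-- pv_equiv track=rewrite | github.com/Follen-cry/egozero | preprocess.py | suppress_short_detected_segments
-- ===== SOURCE A (Python) =====
-- def suppress_short_detected_segments(lst, n):
--     """If contiguous segments are shorter than length `n`, set them to `None`"""
--     count = 0
--     indices = []
--
--     for i, val in enumerate(lst):
--         if val is not None:
--             count += 1
--         else:
--             if 0 < count < n:
--                 indices.extend(range(i - count, i))
--             count = 0
--
--     if 0 < count < n:
--         indices.extend(range(len(lst) - count, len(lst)))
--
--     for i in indices:
--         lst[i] = None
--
--     return lst
-- ===== SOURCE B (Python) =====
-- def _flush(run, n):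
--     """A completed run of non-None values: blank it if shorter than n."""
--     return [None] * len(run) if len(run) < n else run
--
--
-- def suppress_short_detected_segments(lst, n):
--     """If contiguous segments are shorter than length `n`, set them to `None`"""
--     out = []
--     run = []
--     for v in lst:
--         if v is not None:
--             run.append(v)
--         else:
--             out.extend(_flush(run, n))
--             out.append(None)
--             run = []
--     out.extend(_flush(run, n))
--     lst[:] = out
--     return lst
-- ===== Notes on version B (the rewrite author's own statement) =====
-- stated objective: idiomatic
-- what changed: B does a single run-buffering rebuild pass (accumulate each contiguous non-None run, emit it blanked or kept when it ends) instead of A's index-collecting scan followed by a separate mutation loop over the collected indices.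
import Mathlib
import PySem

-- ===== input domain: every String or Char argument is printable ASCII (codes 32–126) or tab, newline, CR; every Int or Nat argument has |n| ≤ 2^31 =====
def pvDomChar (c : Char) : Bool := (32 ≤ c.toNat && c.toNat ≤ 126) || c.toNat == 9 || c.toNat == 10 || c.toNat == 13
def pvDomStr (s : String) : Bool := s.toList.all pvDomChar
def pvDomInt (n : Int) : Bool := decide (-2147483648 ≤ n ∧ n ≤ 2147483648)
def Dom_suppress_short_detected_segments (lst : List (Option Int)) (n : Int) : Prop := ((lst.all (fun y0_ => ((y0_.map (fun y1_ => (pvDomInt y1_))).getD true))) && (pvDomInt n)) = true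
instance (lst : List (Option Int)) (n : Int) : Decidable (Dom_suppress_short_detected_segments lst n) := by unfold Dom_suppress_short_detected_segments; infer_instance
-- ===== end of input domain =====

-- B replaces A's index-collecting scan + separate null-out loop by one run-buffering rebuild pass (idiomatic; same cost).
-- A mutates lst in place; B mutates via lst[:] = out, so both sides' observable effect and return value agree.

-- ===== PORT A =====
-- the enumerate loop of A: carries (i, count, indices)
def pvLoopA (n : Int) : List (Option Int) → Int → Int → List Int → Int × List Int
  | [], _, count, indices => (count, indices)
  | v :: rest, i, count, indices =>
    match v with
    | some _ => pvLoopA n rest (i + 1) (count + 1) indices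
    | none =>
        pvLoopA n rest (i + 1) 0
          (if 0 < count ∧ count < n then indices ++ PySem.List.pyRange (i - count) i 1 else indices)

def suppress_short_detected_segments (lst : List (Option Int)) (n : Int) : List (Option Int) :=
  let p := pvLoopA n lst 0 0 []
  let indices :=
    if 0 < p.1 ∧ p.1 < n then
      p.2 ++ PySem.List.pyRange ((lst.length : Int) - p.1) (lst.length : Int) 1
    else p.2
  -- for i in indices: lst[i] = None   (indices are in range, so pySetD is exact)
  indices.foldl (fun acc i => PySem.List.pySetD acc i none) lst

-- ===== PORT B =====
def pvFlush (n : Int) (run : List (Option Int)) : List (Option Int) :=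
  if (run.length : Int) < n then List.replicate run.length none else run

-- the rebuild loop of B: carries (out, run)
def pvLoopB (n : Int) : List (Option Int) → List (Option Int) → List (Option Int) → List (Option Int)
  | [], out, run => out ++ pvFlush n run
  | v :: rest, out, run =>
    match v with
    | some _ => pvLoopB n rest out (run ++ [v])
    | none => pvLoopB n rest (out ++ pvFlush n run ++ [none]) []

def suppress_short_detected_segments_alt (lst : List (Option Int)) (n : Int) : List (Option Int) :=
  pvLoopB n lst [] []

-- ===== PRECONDITION & SPEC =====
def Spec_suppress_short_detected_segments (lst : List (Option Int)) (n : Int) (out : List (Option Int)) : Prop := out = suppress_short_detected_segments_alt lst n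
instance (lst : List (Option Int)) (n : Int) (out : List (Option Int)) : Decidable (Spec_suppress_short_detected_segments lst n out) := by unfold Spec_suppress_short_detected_segments; infer_instance

-- ===== CLAIM (what is proved, stated in full; the proofs are below) =====
def Claim_equal_suppress_short_detected_segments : Prop := ∀ (lst : List (Option Int)) (n : Int), Dom_suppress_short_detected_segments lst n → Spec_suppress_short_detected_segments lst n (suppress_short_detected_segments lst n)

-- ===== LEMMAS AND PROOFS =====

-- pvLoopA only appends to its indices accumulator
theorem pvLoopA_acc (n : Int) (l : List (Option Int)) :
    ∀ (i count : Int) (idx : List Int),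
      pvLoopA n l i count idx = ((pvLoopA n l i count []).1, idx ++ (pvLoopA n l i count []).2) := by
  induction l with
  | nil => intro i count idx; simp [pvLoopA]
  | cons v rest ih =>
    intro i count idx
    cases v with
    | some x => simp only [pvLoopA]; exact ih (i + 1) (count + 1) idx
    | none =>
      simp only [pvLoopA]
      rw [ih (i + 1) 0 (if 0 < count ∧ count < n then idx ++ PySem.List.pyRange (i - count) i 1 else idx),
          ih (i + 1) 0 (if 0 < count ∧ count < n then [] ++ PySem.List.pyRange (i - count) i 1 else [])]
      split_ifs <;> simp

-- setting positions out.length .. out.length+run.length-1 to none blanks exactly the run block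
theorem pvSetRange (run : List (Option Int)) :
    ∀ (out rest : List (Option Int)),
      (PySem.List.pyRange (out.length : Int) ((out.length : Int) + (run.length : Int)) 1).foldl
          (fun acc i => PySem.List.pySetD acc i none) (out ++ run ++ rest)
        = out ++ List.replicate run.length none ++ rest := by
  induction run with
  | nil =>
    intro out rest
    have h0 : PySem.List.pyRange ((out.length : Int)) ((out.length : Int) + (([] : List (Option Int)).length : Int)) 1 = [] :=
      PySem.List.pyRange_one_eq_nil (by simp)
    rw [h0]
    simp
  | cons v t ih =>
    intro out rest
    have h1 : (out.length : Int) < (out.length : Int) + ((v :: t).length : Int) := by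
      simp only [List.length_cons]; push_cast; omega
    rw [PySem.List.pyRange_one_cons h1]
    simp only [List.foldl_cons]
    have hset : PySem.List.pySetD (out ++ (v :: t) ++ rest) ((out.length : Nat) : Int) none
        = (out ++ [none]) ++ t ++ rest := by
      rw [PySem.List.pySetD_natCast, List.append_assoc, List.cons_append,
          List.set_append_right out.length none le_rfl]
      simp
    rw [hset]
    have harg2 : (out.length : Int) + ((v :: t).length : Int)
        = ((out ++ [none]).length : Int) + (t.length : Int) := by
      simp only [List.length_append, List.length_cons, List.length_nil]; push_cast; omega
    have harg1 : (out.length : Int) + 1 = ((out ++ [none]).length : Int) := by simp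
    rw [harg2, harg1, ih (out ++ [none]) rest]
    simp [List.replicate_succ, List.append_assoc]

-- pvFlush agrees with A's short-segment test
theorem pvFlush_of_cond (n : Int) (run : List (Option Int)) :
    pvFlush n run = if 0 < (run.length : Int) ∧ (run.length : Int) < n
      then List.replicate run.length none else run := by
  unfold pvFlush
  rcases run with _ | ⟨v, t⟩
  · simp
  · have h : (0 : Int) < ((v :: t).length : Int) := by
      simp only [List.length_cons]; push_cast; omega
    by_cases h2 : (((v :: t).length : Nat) : Int) < n
    · rw [if_pos h2, if_pos ⟨h, h2⟩]
    · rw [if_neg h2, if_neg (by tauto)]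

-- length of a flushed run equals the run's length
theorem pvFlush_length (n : Int) (run : List (Option Int)) :
    (pvFlush n run).length = run.length := by
  unfold pvFlush; split_ifs <;> simp

-- main invariant: A's finish from state (i = |out|+|run|, count = |run|, idx = []) on suffix l,
-- applied to out ++ run ++ l, equals B's loop from (out, run)
theorem pvMain (n : Int) (l : List (Option Int)) :
    ∀ (out run : List (Option Int)),
      (let p := pvLoopA n l ((out.length : Int) + (run.length : Int)) (run.length : Int) []
       let idx := if 0 < p.1 ∧ p.1 < n then
           p.2 ++ PySem.List.pyRange (((out.length : Int) + (run.length : Int) + (l.length : Int)) - p.1)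
               ((out.length : Int) + (run.length : Int) + (l.length : Int)) 1
         else p.2
       idx.foldl (fun acc i => PySem.List.pySetD acc i none) (out ++ run ++ l))
      = pvLoopB n l out run := by
  induction l with
  | nil =>
    intro out run
    simp only [pvLoopA, pvLoopB, List.length_nil, Nat.cast_zero, add_zero, List.append_nil,
      List.nil_append]
    by_cases h : 0 < (run.length : Int) ∧ (run.length : Int) < n
    · rw [if_pos h]
      have harg : (out.length : Int) + (run.length : Int) - (run.length : Int) = (out.length : Int) := by ring
      rw [harg]
      have hsr := pvSetRange run out []
      simp only [List.append_nil] at hsr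
      rw [hsr, pvFlush_of_cond, if_pos h]
    · rw [if_neg h, pvFlush_of_cond, if_neg h]
      simp
  | cons v rest ih =>
    intro out run
    cases v with
    | some x =>
      simp only [pvLoopA, pvLoopB]
      have hthis := ih out (run ++ [some x])
      simp only [List.length_append, List.length_cons, List.length_nil] at hthis ⊢
      push_cast at hthis ⊢
      have e1 : (out.length : Int) + (run.length : Int) + 1 = (out.length : Int) + ((run.length : Int) + 1) := by ring
      have e2 : (out.length : Int) + (run.length : Int) + ((rest.length : Int) + 1)
          = (out.length : Int) + ((run.length : Int) + 1) + (rest.length : Int) := by ring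
      rw [e1, e2]
      simpa [List.append_assoc] using hthis
    | none =>
      simp only [pvLoopA, pvLoopB]
      rw [pvLoopA_acc n rest ((out.length : Int) + (run.length : Int) + 1) 0
            (if 0 < (run.length : Int) ∧ (run.length : Int) < n
              then [] ++ PySem.List.pyRange ((out.length : Int) + (run.length : Int) - (run.length : Int))
                     ((out.length : Int) + (run.length : Int)) 1 else [])]
      dsimp only
      set p := pvLoopA n rest ((out.length : Int) + (run.length : Int) + 1) 0 [] with hp
      set X := (if 0 < (run.length : Int) ∧ (run.length : Int) < n
          then [] ++ PySem.List.pyRange ((out.length : Int) + (run.length : Int) - (run.length : Int))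
                 ((out.length : Int) + (run.length : Int)) 1 else ([] : List Int)) with hX
      have hre : (if 0 < p.1 ∧ p.1 < n then (X ++ p.2) ++
            PySem.List.pyRange (((out.length : Int) + (run.length : Int) + (((none :: rest) : List (Option Int)).length : Int)) - p.1)
              ((out.length : Int) + (run.length : Int) + (((none :: rest) : List (Option Int)).length : Int)) 1
          else X ++ p.2)
          = X ++ (if 0 < p.1 ∧ p.1 < n then p.2 ++
            PySem.List.pyRange (((out.length : Int) + (run.length : Int) + (((none :: rest) : List (Option Int)).length : Int)) - p.1)
              ((out.length : Int) + (run.length : Int) + (((none :: rest) : List (Option Int)).length : Int)) 1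
          else p.2) := by
        split_ifs <;> simp
      rw [hre, List.foldl_append]
      have hbase : List.foldl (fun acc i => PySem.List.pySetD acc i none) (out ++ run ++ (none :: rest)) X
          = (out ++ pvFlush n run ++ [none]) ++ rest := by
        by_cases h : 0 < (run.length : Int) ∧ (run.length : Int) < n
        · rw [hX, if_pos h]
          have harg : (out.length : Int) + (run.length : Int) - (run.length : Int) = (out.length : Int) := by ring
          rw [harg]
          simp only [List.nil_append]
          have hsr := pvSetRange run out (none :: rest)
          rw [hsr, pvFlush_of_cond, if_pos h]
          simp
        · rw [hX, if_neg h, pvFlush_of_cond, if_neg h]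
          simp
      rw [hbase]
      have hthis := ih (out ++ pvFlush n run ++ [none]) []
      simp only [List.length_nil, Nat.cast_zero, add_zero, List.append_nil] at hthis
      have harg : (((out ++ pvFlush n run ++ [none]).length : Nat) : Int)
          = (out.length : Int) + (run.length : Int) + 1 := by
        simp only [List.length_append, List.length_cons, List.length_nil, pvFlush_length]
        push_cast; ring
      rw [harg] at hthis
      rw [← hp] at hthis
      have e2 : (out.length : Int) + (run.length : Int) + (((none :: rest) : List (Option Int)).length : Int)
          = (out.length : Int) + (run.length : Int) + 1 + (rest.length : Int) := by
        simp only [List.length_cons]; push_cast; ring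
      rw [e2]
      exact hthis

-- ===== VERDICT (by name: the statement is the Claim_ definition above) =====
theorem suppress_short_detected_segments_spec : Claim_equal_suppress_short_detected_segments := by
  intro lst n _
  unfold Spec_suppress_short_detected_segments suppress_short_detected_segments suppress_short_detected_segments_alt
  have hmain := pvMain n lst [] []
  simpa using hmain
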